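-- pv_equiv track=rewrite | github.com/pschonev/double-fischer-random | src/dfrc_analysis/analysis/eval.py | calculate_max_nodes_per_color
-- ===== SOURCE A (Python) =====
-- def calculate_max_nodes_per_color(
--     moves_per_ply: list[int],
-- ) -> tuple[int, int]:
--     """Calculate maximum possible nodes for white and black."""
--     white_total = 0
--     black_total = 0
--     cumulative_product = 1
--
--     for i in range(len(moves_per_ply)):
--         cumulative_product *= moves_per_ply[i]
--         # White's level
--         if i % 2 == 0:
--             white_total += cumulative_product
--         # Black's level
--         else:
--             black_total += cumulative_product
--
--     return white_total, black_total
-- ===== SOURCE B (Python) =====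
-- def calculate_max_nodes_per_color(
--     moves_per_ply: list[int],
-- ) -> tuple[int, int]:
--     """Calculate maximum possible nodes for white and black."""
--     # chunk the plies into consecutive pairs (last chunk may be a single ply)
--     pairs = []
--     i = 0
--     while i < len(moves_per_ply):
--         pairs.append(moves_per_ply[i:i + 2])
--         i += 2
--     # build the answer back-to-front: a suffix's totals scale by the pair product
--     white, black = 0, 0
--     for chunk in reversed(pairs):
--         if len(chunk) == 1:
--             white, black = chunk[0], 0
--         else:
--             first, second = chunk
--             p = first * second
--             white = first + p * white
--             black = p * (1 + black)
--     return (white, black)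
-- ===== Notes on version B (the rewrite author's own statement) =====
-- stated objective: alternative
-- what changed: Replaced the single forward pass that keeps a running cumulative product and a parity test on the index by a pairwise decomposition: the list is chunked into consecutive ply pairs and the totals are built back-to-front with the recurrence white = a + a*b*white', black = a*b*(1 + black'), so no cumulative product and no index parity appear.
import Mathlib
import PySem

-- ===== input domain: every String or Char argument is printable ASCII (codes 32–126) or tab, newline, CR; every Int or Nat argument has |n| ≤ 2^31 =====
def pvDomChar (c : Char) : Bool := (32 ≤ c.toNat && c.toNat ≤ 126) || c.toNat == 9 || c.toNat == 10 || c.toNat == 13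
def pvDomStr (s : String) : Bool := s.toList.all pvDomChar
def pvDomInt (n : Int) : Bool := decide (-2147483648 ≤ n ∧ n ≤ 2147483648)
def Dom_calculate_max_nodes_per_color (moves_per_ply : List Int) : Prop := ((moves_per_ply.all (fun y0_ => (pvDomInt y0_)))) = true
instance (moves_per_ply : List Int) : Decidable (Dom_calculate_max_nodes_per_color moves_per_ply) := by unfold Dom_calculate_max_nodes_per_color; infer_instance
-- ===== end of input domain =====

-- B rebuilds the totals back-to-front over consecutive ply pairs instead of A's forward
-- parity-accumulating pass with a running cumulative product; same values, same O(n) cost.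

-- ===== PORT A =====
-- the for-loop of A: remaining plies, current index i, state (white_total, black_total, cumulative_product)
def pvLoopA : List Int → Nat → Int × Int × Int → Int × Int
  | [], _, (w, b, _) => (w, b)
  | m :: rest, i, (w, b, c) =>
      let c' := c * m
      if i % 2 == 0 then pvLoopA rest (i + 1) (w + c', b, c')
      else pvLoopA rest (i + 1) (w, b + c', c')

def calculate_max_nodes_per_color (moves_per_ply : List Int) : Int × Int :=
  pvLoopA moves_per_ply 0 (0, 0, 1)

-- ===== PORT B =====
-- the while-loop of B: append moves_per_ply[i:i+2] while i < len, stepping i by 2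
def pvChunks : List Int → List (List Int)
  | [] => []
  | [a] => [[a]]
  | a :: b :: rest => [a, b] :: pvChunks rest

-- body of B's for-loop over reversed(pairs)
def pvStepB (wb : Int × Int) (chunk : List Int) : Int × Int :=
  match chunk with
  | [a] => (a, 0)
  | first :: second :: _ =>
      let p := first * second
      (first + p * wb.1, p * (1 + wb.2))
  | [] => wb  -- unreachable: pvChunks never produces an empty chunk

def calculate_max_nodes_per_color_alt (moves_per_ply : List Int) : Int × Int :=
  (pvChunks moves_per_ply).reverse.foldl pvStepB (0, 0)

-- ===== PRECONDITION & SPEC =====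
def Spec_calculate_max_nodes_per_color (moves_per_ply : List Int) (out : Int × Int) : Prop := out = calculate_max_nodes_per_color_alt moves_per_ply
instance (moves_per_ply : List Int) (out : Int × Int) : Decidable (Spec_calculate_max_nodes_per_color moves_per_ply out) := by unfold Spec_calculate_max_nodes_per_color; infer_instance

-- ===== CLAIM (what is proved, stated in full; the proofs are below) =====
def Claim_equal_calculate_max_nodes_per_color : Prop := ∀ (moves_per_ply : List Int), Dom_calculate_max_nodes_per_color moves_per_ply → Spec_calculate_max_nodes_per_color moves_per_ply (calculate_max_nodes_per_color moves_per_ply)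

-- ===== LEMMAS AND PROOFS =====

-- B's fold over the reversed chunk list, written as a foldr over the chunks
theorem alt_eq_foldr (xs : List Int) :
    calculate_max_nodes_per_color_alt xs
      = (pvChunks xs).foldr (fun ch wb => pvStepB wb ch) (0, 0) := by
  simp [calculate_max_nodes_per_color_alt, List.foldl_reverse]

-- A's loop started at an even index computes w,b plus c times B's totals for the rest
theorem loopA_eq (xs : List Int) :
    ∀ (i : Nat) (w b c : Int), i % 2 = 0 →
      pvLoopA xs i (w, b, c)
        = (w + c * ((pvChunks xs).foldr (fun ch wb => pvStepB wb ch) (0, 0)).1,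
           b + c * ((pvChunks xs).foldr (fun ch wb => pvStepB wb ch) (0, 0)).2) := by
  induction xs using pvChunks.induct with
  | case1 => intro i w b c _; simp [pvLoopA, pvChunks]
  | case2 a =>
      intro i w b c hi
      simp [pvLoopA, pvChunks, pvStepB, hi]
  | case3 a b rest ih =>
      intro i w bl c hi
      have h1 : (i + 1) % 2 = 1 := by omega
      have h2 : (i + 2) % 2 = 0 := by omega
      simp only [pvLoopA, hi, h1, beq_iff_eq, if_true]
      simp only [Nat.one_ne_zero, if_false]
      rw [show i + 1 + 1 = i + 2 from rfl, ih (i + 2) (w + c * a) (bl + c * a * b) (c * a * b) h2]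
      simp only [pvChunks, List.foldr_cons, pvStepB]
      exact Prod.ext (by ring) (by ring)

-- ===== VERDICT (by name: the statement is the Claim_ definition above) =====
theorem calculate_max_nodes_per_color_spec : Claim_equal_calculate_max_nodes_per_color := by
  intro xs _
  unfold Spec_calculate_max_nodes_per_color
  rw [calculate_max_nodes_per_color, loopA_eq xs 0 0 0 1 rfl, alt_eq_foldr]
  simp
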